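-- pv_equiv track=rewrite | github.com/ThomasSanna/atelier-de-programmation-L3STI | Atelier 3/Exercice 3/main.py | outputStr
-- ===== SOURCE A (Python) =====
-- def outputStr(mot: str, lPos: list) -> str:
--     """
--     Retourne une chaîne de caractères avec des lettres trouvées et des tirets pour les lettres non trouvées.
--
--     Args:
--         mot (str): Le mot à afficher partiellement.
--         lPos (list): La liste des positions des lettres trouvées.
--
--     Returns:
--         str: Une chaîne de caractères avec les lettres trouvées et des tirets pour les lettres non trouvées.
--     """
--     res = ""
--     for i in range(len(mot)):
--         if i in lPos:
--             res += mot[i]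
--         else:
--             res += "-"
--     return res
-- ===== SOURCE B (Python) =====
-- def outputStr(mot: str, lPos: list) -> str:
--     res = ['-'] * len(mot)
--     for p in lPos:
--         if 0 <= p < len(mot):
--             res[p] = mot[p]
--     return ''.join(res)
-- ===== Notes on version B (the rewrite author's own statement) =====
-- stated objective: alternative
-- what changed: B scatters the found letters into a pre-filled buffer of dashes by iterating over lPos, instead of scanning every index of mot and testing membership in lPos.
import Mathlib
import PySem

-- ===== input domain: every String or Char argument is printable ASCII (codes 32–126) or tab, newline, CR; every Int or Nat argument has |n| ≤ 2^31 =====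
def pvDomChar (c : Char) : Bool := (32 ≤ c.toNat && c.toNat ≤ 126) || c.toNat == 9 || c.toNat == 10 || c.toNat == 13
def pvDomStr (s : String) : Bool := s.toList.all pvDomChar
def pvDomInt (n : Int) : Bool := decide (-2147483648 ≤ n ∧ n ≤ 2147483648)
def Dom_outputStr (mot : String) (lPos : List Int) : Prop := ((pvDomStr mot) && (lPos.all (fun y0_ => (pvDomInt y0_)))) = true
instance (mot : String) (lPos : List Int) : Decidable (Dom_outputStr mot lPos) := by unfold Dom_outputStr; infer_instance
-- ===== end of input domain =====

-- B scatters the found letters into a buffer of dashes by iterating over lPos instead of testing membership for every index (alternative decomposition).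


-- ===== PORT A =====
-- res = ""; for i in range(len(mot)): res += mot[i] if i in lPos else "-"
def outputStr (mot : String) (lPos : List Int) : String :=
  let res : List Char :=
    (PySem.List.pyRange 0 (PySem.Str.len mot) 1).foldl
      (fun res i =>
        if lPos.contains i then
          match PySem.List.pyGet? mot.toList i with
          | some c => res ++ [c]
          | none => res            -- unreachable: i ranges over 0..len(mot)-1
        else res ++ ['-'])
      []
  String.ofList res

-- ===== PORT B =====
-- res = ['-']*len(mot); for p in lPos: if 0 <= p < len(mot): res[p] = mot[p]; return ''.join(res)
def outputStr_alt (mot : String) (lPos : List Int) : String :=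
  let cs := mot.toList
  let buf :=
    lPos.foldl
      (fun buf p =>
        if 0 ≤ p ∧ p < (cs.length : Int) then buf.set p.toNat (cs.getD p.toNat '-')
        else buf)
      (List.replicate cs.length '-')
  String.ofList buf

-- ===== PRECONDITION & SPEC =====
def Spec_outputStr (mot : String) (lPos : List Int) (out : String) : Prop := out = outputStr_alt mot lPos
instance (mot : String) (lPos : List Int) (out : String) : Decidable (Spec_outputStr mot lPos out) := by unfold Spec_outputStr; infer_instance

-- ===== CLAIM (what is proved, stated in full; the proofs are below) =====
def Claim_equal_outputStr : Prop := ∀ (mot : String) (lPos : List Int), Dom_outputStr mot lPos → Spec_outputStr mot lPos (outputStr mot lPos)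

-- ===== LEMMAS AND PROOFS =====

-- the intended character at index i
def pvTarget (cs : List Char) (lPos : List Int) (i : Nat) : Char :=
  if lPos.contains (i : Int) then cs.getD i '-' else '-'

-- A's fold over range builds the map of pvTarget
theorem pvA_fold (cs : List Char) (lPos : List Int) :
    ∀ (n : Nat), n ≤ cs.length → ∀ (acc : List Char),
      ((List.range n).map (fun k : Nat => (k : Int))).foldl
        (fun res (i : Int) =>
          if lPos.contains i then
            match PySem.List.pyGet? cs i with
            | some c => res ++ [c]
            | none => res
          else res ++ ['-'])
        acc
      = acc ++ (List.range n).map (pvTarget cs lPos) := by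
  intro n
  induction n with
  | zero => intro _ acc; simp
  | succ n ih =>
    intro hn acc
    have hn' : n < cs.length := by omega
    rw [List.range_succ, List.map_append, List.foldl_append, ih (by omega) acc,
      List.map_append]
    simp only [List.map_cons, List.map_nil, List.foldl_cons, List.foldl_nil]
    have hget : PySem.List.pyGet? cs ((n : Nat) : Int) = some cs[n] := by
      simp [PySem.List.pyGet?_natCast, List.getElem?_eq_getElem hn']
    unfold pvTarget
    by_cases hmem : ((n : Nat) : Int) ∈ lPos
    · simp [hmem, hget, List.getD_eq_getElem?_getD, List.getElem?_eq_getElem hn']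
    · simp [hmem, List.getElem?_eq_getElem hn']

-- scatter preserves length
theorem pvB_len (cs : List Char) : ∀ (l : List Int) (buf : List Char),
    (l.foldl
      (fun buf p =>
        if 0 ≤ p ∧ p < (cs.length : Int) then buf.set p.toNat (cs.getD p.toNat '-')
        else buf)
      buf).length = buf.length := by
  intro l
  induction l with
  | nil => intro buf; rfl
  | cons p l ih =>
    intro buf
    simp only [List.foldl_cons, ih]
    split_ifs <;> simp

-- scatter result pointwise
theorem pvB_get (cs : List Char) : ∀ (l : List Int) (buf : List Char),
    buf.length = cs.length →
    ∀ (i : Nat), i < cs.length →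
      (l.foldl
        (fun buf p =>
          if 0 ≤ p ∧ p < (cs.length : Int) then buf.set p.toNat (cs.getD p.toNat '-')
          else buf)
        buf).getD i '-'
      = if l.contains (i : Int) then cs.getD i '-' else buf.getD i '-' := by
  intro l
  induction l with
  | nil => intro buf _ i _; simp
  | cons p l ih =>
    intro buf hlen i hi
    simp only [List.foldl_cons]
    have hstep : (if 0 ≤ p ∧ p < ((cs.length : Nat) : Int) then
        buf.set p.toNat (cs.getD p.toNat '-') else buf).length = cs.length := by
      split_ifs <;> simp [hlen]
    rw [ih _ hstep i hi]
    by_cases hmem : l.contains (i : Int) = true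
    · have h2 : (p :: l).contains (i : Int) = true := by
        simp only [List.contains_cons, hmem, Bool.or_true]
      rw [if_pos hmem, if_pos h2]
    · by_cases hpi : p = (i : Int)
      · have h2 : (p :: l).contains (i : Int) = true := by
          simp [List.contains_cons, hpi]
        have hcond : 0 ≤ p ∧ p < ((cs.length : Nat) : Int) := by
          constructor <;> omega
        have hpt : p.toNat = i := by omega
        rw [if_neg hmem, if_pos h2, if_pos hcond, hpt,
          List.getD_eq_getElem?_getD, List.getElem?_set_self (by omega), Option.getD_some]
      · have h2 : ¬ ((p :: l).contains (i : Int) = true) := by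
          simp only [List.contains_cons, Bool.or_eq_true, beq_iff_eq]
          rintro (h | h)
          · exact hpi h.symm
          · exact hmem (by simpa using h)
        rw [if_neg hmem, if_neg h2]
        split_ifs with hc
        · have hne : p.toNat ≠ i := fun h => hpi (by omega)
          rw [List.getD_eq_getElem?_getD, List.getElem?_set_ne hne,
            ← List.getD_eq_getElem?_getD]
        · rfl

-- B's scatter result is the map of pvTarget
theorem pvB_eq_map (cs : List Char) (lPos : List Int) :
    (List.range cs.length).map (pvTarget cs lPos)
    = lPos.foldl
        (fun buf p =>
          if 0 ≤ p ∧ p < (cs.length : Int) then buf.set p.toNat (cs.getD p.toNat '-')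
          else buf)
        (List.replicate cs.length '-') := by
  set B := lPos.foldl
      (fun buf p =>
        if 0 ≤ p ∧ p < (cs.length : Int) then buf.set p.toNat (cs.getD p.toNat '-')
        else buf)
      (List.replicate cs.length '-') with hB
  have hlenB : B.length = cs.length := by rw [hB, pvB_len, List.length_replicate]
  apply List.ext_getElem
  · simp [hlenB]
  · intro i h1 h2
    have hi : i < cs.length := by simpa using h1
    have hgB := pvB_get cs lPos (List.replicate cs.length '-') (by simp) i hi
    rw [← hB] at hgB
    have hrep : (List.replicate cs.length '-').getD i '-' = '-' := by
      rw [List.getD_eq_getElem?_getD, List.getElem?_replicate]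
      simp [hi]
    have hfold : B.getD i '-' = B[i]'h2 := by
      rw [List.getD_eq_getElem?_getD, List.getElem?_eq_getElem h2, Option.getD_some]
    rw [List.getElem_map, List.getElem_range, ← hfold, hgB, hrep]
    simp only [pvTarget]

theorem pvEq (mot : String) (lPos : List Int) : outputStr mot lPos = outputStr_alt mot lPos := by
  dsimp only [outputStr, outputStr_alt]
  refine congrArg String.ofList ?_
  set cs := mot.toList with hcs
  have hr : PySem.List.pyRange 0 (PySem.Str.len mot) 1
      = (List.range cs.length).map (fun k : Nat => (k : Int)) := by
    rw [PySem.List.pyRange_one]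
    simp [PySem.Str.len_eq, hcs]
  rw [hr]
  have hA := pvA_fold cs lPos cs.length (le_refl _) []
  rw [List.nil_append] at hA
  rw [hA, pvB_eq_map]

-- ===== VERDICT (by name: the statement is the Claim_ definition above) =====
theorem outputStr_spec : Claim_equal_outputStr := by
  intro mot lPos _
  exact pvEq mot lPos
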